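-- pv_equiv track=rewrite | github.com/xjfcnfw3/algorithm | programers/유연근무제.py | solution
-- ===== SOURCE A (Python) =====
-- def solution(schedules, timelogs, startday):
--     answer = 0
--
--     for i in range(len(schedules)):
--         day = startday
--         time = schedules[i] + 10
--         offset = True
--         if time % 100 >= 60:
--             time += 100
--             time -= 60
--
--         for j in range(len(timelogs[i])):
--             if day == 6 or day == 7:
--                 day = day + 1 if day < 7 else 1
--                 continue
--             if timelogs[i][j] > time:
--                 offset = False
--                 break
--             day = day + 1 if day < 7 else 1
--         if offset:
--             answer += 1
--     return answer
-- ===== SOURCE B (Python) =====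
-- def solution(schedules, timelogs, startday):
--     n = len(schedules)
--     thresholds = []
--     for s in schedules:
--         t = s + 10
--         if t % 100 >= 60:
--             t += 40
--         thresholds.append(t)
--     ok = [True] * n
--     width = max((len(timelogs[i]) for i in range(n)), default=0)
--     d = startday
--     for j in range(width):
--         if d != 6 and d != 7:
--             for i in range(n):
--                 if j < len(timelogs[i]) and timelogs[i][j] > thresholds[i]:
--                     ok[i] = False
--         d = d + 1 if d < 7 else 1
--     return sum(ok)
-- ===== Notes on version B (the rewrite author's own statement) =====
-- stated objective: alternative
-- what changed: Transposes the traversal: instead of A's row-major per-employee loop with a break, B precomputes all thresholds once, then sweeps day-columns, marking employees False in an ok-array sieve whenever a non-weekend column entry exceeds their threshold, and finally sums the survivors.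
import Mathlib
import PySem

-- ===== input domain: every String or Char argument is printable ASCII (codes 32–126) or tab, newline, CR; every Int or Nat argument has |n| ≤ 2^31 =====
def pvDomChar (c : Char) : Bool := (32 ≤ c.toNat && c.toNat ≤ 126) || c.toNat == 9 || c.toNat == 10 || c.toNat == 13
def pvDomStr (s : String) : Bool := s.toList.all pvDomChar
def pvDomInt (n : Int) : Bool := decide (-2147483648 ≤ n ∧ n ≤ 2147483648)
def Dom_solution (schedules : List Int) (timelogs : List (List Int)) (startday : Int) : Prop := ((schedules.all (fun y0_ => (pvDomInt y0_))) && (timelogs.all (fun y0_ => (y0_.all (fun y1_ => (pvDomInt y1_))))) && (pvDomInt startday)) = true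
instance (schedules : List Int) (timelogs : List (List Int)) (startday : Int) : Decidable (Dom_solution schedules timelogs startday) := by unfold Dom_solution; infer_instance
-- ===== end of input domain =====

-- B transposes the traversal: thresholds are computed once, then a column-wise sweep over
-- day indices eliminates employees in an ok-array sieve; same return values, different
-- algorithm shape (objective: alternative).

-- ===== PORT A =====
-- inner loop 'for j in range(len(timelogs[i]))' with day counter, offset flag and break
def solInner (time : Int) : List Int → Int → Bool
  | [], _ => true
  | log :: rest, day =>
    if day == 6 || day == 7 then
      solInner time rest (if day < 7 then day + 1 else 1)
    else if log > time then false
    else solInner time rest (if day < 7 then day + 1 else 1)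

-- outer loop 'for i in range(len(schedules))'; i ≥ 0 always, so timelogs[i]? is exact;
-- Python raises IndexError on the none branch (outside Pre_solution)
def solGo (timelogs : List (List Int)) (startday : Int) : List Int → Nat → Int → Int
  | [], _, answer => answer
  | s :: rest, i, answer =>
    match timelogs[i]? with
    | none => answer
    | some logs =>
      let time := s + 10
      let time := if PySem.Int.mod time 100 ≥ 60 then time + 100 - 60 else time
      solGo timelogs startday rest (i + 1)
        (answer + (if solInner time logs startday then 1 else 0))

def solution (schedules : List Int) (timelogs : List (List Int)) (startday : Int) : Int :=
  solGo timelogs startday schedules 0 0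

-- ===== PORT B =====
-- threshold loop body: t = s + 10; if t % 100 >= 60: t += 40
def altThr (s : Int) : Int :=
  let t := s + 10
  if PySem.Int.mod t 100 ≥ 60 then t + 40 else t

-- column sweep 'for j in range(width)': on a non-weekend day j, every employee whose
-- j-th log exceeds their threshold is marked False in the ok list
def colLoop (pairs : List (List Int × Int)) : Nat → Nat → Int → List Bool → List Bool
  | _, 0, _, ok => ok
  | j, rem + 1, d, ok =>
    let ok' := if d == 6 || d == 7 then ok
      else (ok.zip pairs).map (fun q =>
        match q.2.1[j]? with
        | some v => if v > q.2.2 then false else q.1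
        | none => q.1)
    colLoop pairs (j + 1) rem (if d < 7 then d + 1 else 1) ok'

def solution_alt (schedules : List Int) (timelogs : List (List Int)) (startday : Int) : Int :=
  let thresholds := schedules.map altThr
  let pairs := (timelogs.take schedules.length).zip thresholds
  let width := (pairs.map (fun p => p.1.length)).foldr Nat.max 0
  let ok := colLoop pairs 0 width startday (List.replicate schedules.length true)
  (ok.map (fun b => if b then (1 : Int) else 0)).sum

-- ===== PRECONDITION & SPEC =====
-- A indexes timelogs[i] for every i < len(schedules): it raises IndexError when timelogs
-- is shorter than schedules; exactly those inputs are excluded.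
def Pre_solution (schedules : List Int) (timelogs : List (List Int)) (startday : Int) : Prop :=
  schedules.length ≤ timelogs.length
instance (schedules : List Int) (timelogs : List (List Int)) (startday : Int) : Decidable (Pre_solution schedules timelogs startday) := by unfold Pre_solution; infer_instance

def pvWitness_solution : List Int × List (List Int) × Int := ([900], [[905, 900]], 1)

def Spec_solution (schedules : List Int) (timelogs : List (List Int)) (startday : Int) (out : Int) : Prop := out = solution_alt schedules timelogs startday
instance (schedules : List Int) (timelogs : List (List Int)) (startday : Int) (out : Int) : Decidable (Spec_solution schedules timelogs startday out) := by unfold Spec_solution; infer_instance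

-- ===== CLAIM (what is proved, stated in full; the proofs are below) =====
def Claim_equal_solution : Prop := ∀ (schedules : List Int) (timelogs : List (List Int)) (startday : Int), Dom_solution schedules timelogs startday → Pre_solution schedules timelogs startday → Spec_solution schedules timelogs startday (solution schedules timelogs startday)

-- ===== LEMMAS AND PROOFS =====

-- row-wise view of what the column sweep contributes to one employee:
-- all columns j, j+1, …, j+rem-1 pass (weekend, past end of logs, or log ≤ threshold)
def rowCheck (logs : List Int) (t : Int) : Nat → Nat → Int → Bool
  | _, 0, _ => true
  | j, rem + 1, d =>
    (if d == 6 || d == 7 then true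
     else match logs[j]? with
       | some v => decide (v ≤ t)
       | none => true)
    && rowCheck logs t (j + 1) rem (if d < 7 then d + 1 else 1)

theorem zip_map_zip {α : Type} (g : Bool × α → Bool) :
    ∀ (ok : List Bool) (pairs : List α),
      ((ok.zip pairs).map g).zip pairs = (ok.zip pairs).map (fun q => (g q, q.2)) := by
  intro ok
  induction ok with
  | nil => intro pairs; simp
  | cons o rest ih =>
      intro pairs
      cases pairs with
      | nil => simp
      | cons p ps => simp [ih ps]

theorem replicate_zip {α : Type} :
    ∀ (l : List α), (List.replicate l.length true).zip l = l.map (fun x => (true, x)) := by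
  intro l
  induction l with
  | nil => rfl
  | cons x xs ih => simp [List.replicate_succ, ih]

-- the column sweep acts independently and row-wise on each ok entry
theorem colLoop_eq (pairs : List (List Int × Int)) :
    ∀ (rem j : Nat) (d : Int) (ok : List Bool), ok.length ≤ pairs.length →
      colLoop pairs j rem d ok =
        (ok.zip pairs).map (fun q => q.1 && rowCheck q.2.1 q.2.2 j rem d) := by
  intro rem
  induction rem with
  | zero =>
      intro j d ok h
      simp only [colLoop, rowCheck, Bool.and_true]
      exact (List.map_fst_zip h).symm
  | succ k ih =>
      intro j d ok h
      by_cases hw : (d == 6 || d == 7) = true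
      · simp only [colLoop]
        rw [if_pos hw, ih (j + 1) _ ok h]
        apply List.map_congr_left
        intro q _
        simp [rowCheck, hw]
      · simp only [colLoop]
        rw [if_neg hw, ih (j + 1) _ _ (by simp)]
        rw [zip_map_zip, List.map_map]
        apply List.map_congr_left
        intro q _
        simp only [Function.comp, rowCheck, hw]
        cases hq : q.2.1[j]? with
        | none => simp
        | some v =>
            by_cases hv : v > q.2.2
            · simp [hv, show ¬ (v ≤ q.2.2) by omega]
            · simp [hv, show v ≤ q.2.2 by omega]

-- the row-wise view of the sweep equals A's inner loop on the remaining logs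
theorem rowCheck_eq_solInner (logs : List Int) (t : Int) :
    ∀ (rem j : Nat) (d : Int),
      rowCheck logs t j rem d = solInner t ((logs.drop j).take rem) d := by
  intro rem
  induction rem with
  | zero => intro j d; simp [rowCheck, solInner]
  | succ k ih =>
      intro j d
      cases hj : logs[j]? with
      | none =>
          have hge : logs.length ≤ j := by
            by_contra hlt
            simp [List.getElem?_eq_getElem (by omega : j < logs.length)] at hj
          rw [List.drop_eq_nil_of_le hge]
          simp only [rowCheck, hj, List.take_nil, solInner]
          rw [ih (j + 1), List.drop_eq_nil_of_le (by omega : logs.length ≤ j + 1)]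
          cases hw : (d == 6 || d == 7) <;> simp [solInner]
      | some v =>
          have hlt : j < logs.length := by
            rcases Nat.lt_or_ge j logs.length with h' | h'
            · exact h'
            · rw [List.getElem?_eq_none_iff.mpr h'] at hj
              cases hj
          rw [List.drop_eq_getElem_cons hlt, List.take_succ_cons]
          have hv : logs[j] = v := by
            have h2 := List.getElem?_eq_getElem hlt
            rw [hj] at h2
            exact (Option.some.inj h2).symm
          simp only [rowCheck, hj, solInner, hv]
          by_cases hw : (d == 6 || d == 7) = true
          · simp [hw, ih (j + 1)]
          · by_cases hl : v > t
            · simp [hw, hl, show ¬ (v ≤ t) by omega]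
            · simp [hw, hl, show v ≤ t by omega, ih (j + 1)]

theorem length_le_foldr_max' (L : List (List Int × Int)) (p : List Int × Int) (h : p ∈ L) :
    p.1.length ≤ (L.map (fun q => q.1.length)).foldr Nat.max 0 := by
  induction L with
  | nil => simp at h
  | cons t rest ih =>
      simp only [List.map_cons, List.foldr_cons]
      rcases List.mem_cons.mp h with h | h
      · exact h ▸ Nat.le_max_left _ _
      · exact le_trans (ih h) (Nat.le_max_right _ _)

theorem zip_take_map (f : Int → Int) :
    ∀ (schedules : List Int) (timelogs : List (List Int)),
      schedules.length ≤ timelogs.length →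
      (timelogs.take schedules.length).zip (schedules.map f) =
        (schedules.zip timelogs).map (fun p => (p.2, f p.1)) := by
  intro schedules
  induction schedules with
  | nil => intro timelogs _; simp
  | cons s rest ih =>
      intro timelogs h
      cases timelogs with
      | nil => simp at h
      | cons t ts =>
          simp only [List.length_cons, List.take_succ_cons, List.map_cons,
            List.zip_cons_cons]
          rw [ih ts (by simpa using h)]

-- A's outer loop as a sum over zipped rows
theorem solGo_eq (timelogs : List (List Int)) (startday : Int)
    (scheds : List Int) (i : Nat) (answer : Int)
    (h : i + scheds.length ≤ timelogs.length) :
    solGo timelogs startday scheds i answer =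
      answer + ((scheds.zip (timelogs.drop i)).map (fun p =>
        if solInner
            (if PySem.Int.mod (p.1 + 10) 100 ≥ 60 then p.1 + 10 + 100 - 60 else p.1 + 10)
            p.2 startday
         then (1 : Int) else 0)).sum := by
  induction scheds generalizing i answer with
  | nil => simp [solGo]
  | cons s rest ih =>
      have hi : i < timelogs.length := by simp at h; omega
      rw [List.drop_eq_getElem_cons hi]
      simp only [solGo, List.getElem?_eq_getElem hi, List.zip_cons_cons, List.map_cons,
        List.sum_cons]
      rw [ih (i + 1) _ (by simp at h ⊢; omega)]
      ring

theorem solution_eq (schedules : List Int) (timelogs : List (List Int)) (startday : Int)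
    (h : schedules.length ≤ timelogs.length) :
    solution schedules timelogs startday = solution_alt schedules timelogs startday := by
  unfold solution solution_alt
  dsimp only
  rw [solGo_eq timelogs startday schedules 0 0 (by simpa using h), List.drop_zero, zero_add]
  rw [zip_take_map altThr schedules timelogs h]
  have hlen : ((schedules.zip timelogs).map (fun p => (p.2, altThr p.1))).length
      = schedules.length := by
    simp [List.length_zip]; omega
  rw [← hlen, colLoop_eq _ _ 0 startday _ (by simp), replicate_zip, List.map_map,
    List.map_map, List.map_map]
  apply congrArg List.sum
  apply List.map_congr_left
  intro p hp
  simp only [Function.comp, Bool.true_and]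
  have hmem : ((p.2, altThr p.1) : List Int × Int) ∈
      (schedules.zip timelogs).map (fun p => (p.2, altThr p.1)) :=
    List.mem_map_of_mem hp
  have hwid := length_le_foldr_max' _ _ hmem
  rw [rowCheck_eq_solInner p.2 (altThr p.1) _ 0 startday, List.drop_zero,
    List.take_of_length_le hwid]
  have ht : (if PySem.Int.mod (p.1 + 10) 100 ≥ 60 then p.1 + 10 + 100 - 60 else p.1 + 10)
      = altThr p.1 := by
    unfold altThr
    by_cases hc : PySem.Int.mod (p.1 + 10) 100 ≥ 60 <;> simp [hc] <;> omega
  rw [ht]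

-- ===== VERDICT (by name: the statement is the Claim_ definition above) =====
theorem solution_spec : Claim_equal_solution := by
  intro schedules timelogs startday _ hpre
  exact solution_eq schedules timelogs startday hpre
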